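-- pv_equiv track=rewrite | github.com/webis-de/ecir22-query-obfuscation-game | src/prototypes/game/running_prototype/app/points.py | points_average_pos_related_documents
-- ===== SOURCE A (Python) =====
-- import math
--
-- MAX_SEARCH_RESULTS = 8000
--
-- def points_average_pos_related_documents(related_documents_counter, average_related_doc_position):
--     """
--     This function computes the points for the average position of the related documents.
--     @param related_documents_counter: Number of related documents
--     @type related_documents_counter: Integer
--     @param average_related_doc_position: Average positio of the related documents
--     @type average_related_doc_position: Integer
--     @return: Computet points
--     @rtype: Integer
--     """
--     if related_documents_counter == 0:
--         return 0
--
--     average_related_doc_position = normal_round(average_related_doc_position/related_documents_counter)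
--     points = 100
--     for i in range(160, MAX_SEARCH_RESULTS, 160):
--         if average_related_doc_position <= i:
--             return points
--         else:
--             points = points - 2
--     return points
--
-- def normal_round(n):
--     """
--     Rounds numbers according to the common rounding rules.
--     @param n: Number that should be rounded
--     @type n: Float
--     @return: Rounded number
--     @rtype: Integer
--     """
--     if n - math.floor(n) < 0.5:
--         return math.floor(n)
--     return math.ceil(n)
-- ===== SOURCE B (Python) =====
-- import math
--
-- MAX_SEARCH_RESULTS = 8000
--
-- def points_average_pos_related_documents(related_documents_counter, average_related_doc_position):
--     if related_documents_counter == 0: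
--         return 0
--     avg = normal_round(average_related_doc_position / related_documents_counter)
--     steps = max(0, min(49, (avg - 1) // 160))
--     return 100 - 2 * steps
--
-- def normal_round(n):
--     if n - math.floor(n) < 0.5:
--         return math.floor(n)
--     return math.ceil(n)
-- ===== Notes on version B (the rewrite author's own statement) =====
-- stated objective: simpler
-- what changed: Replaced the 49-iteration range(160,8000,160) scan with a closed-form clamped floor division: steps = max(0, min(49, (avg-1)//160)), points = 100 - 2*steps.
import Mathlib
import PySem

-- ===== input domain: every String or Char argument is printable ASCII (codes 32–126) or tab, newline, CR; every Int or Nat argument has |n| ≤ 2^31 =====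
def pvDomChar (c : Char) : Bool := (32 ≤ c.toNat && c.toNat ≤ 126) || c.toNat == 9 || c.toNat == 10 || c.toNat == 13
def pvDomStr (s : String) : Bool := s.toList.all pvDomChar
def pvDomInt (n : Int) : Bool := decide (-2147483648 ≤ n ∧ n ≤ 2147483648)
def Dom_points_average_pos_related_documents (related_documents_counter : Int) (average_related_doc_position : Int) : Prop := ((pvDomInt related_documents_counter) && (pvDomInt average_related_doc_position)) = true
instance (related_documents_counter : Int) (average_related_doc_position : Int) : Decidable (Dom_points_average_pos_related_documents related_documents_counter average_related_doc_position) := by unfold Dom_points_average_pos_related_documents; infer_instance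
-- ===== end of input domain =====

-- B replaces the 49-step ladder loop with a closed-form clamped floor division (simpler).

-- normal_round(x/b): on |x|,|b| ≤ 2^31 Python's float division is accurate enough that
-- round-half-up of the float quotient equals the exact rational round-half-up,
-- which is floor((2x+b)/(2b)); this helper is exact on the stated domain.
def pvNormalRoundDiv (x b : Int) : Int := PySem.Int.floordiv (2 * x + b) (2 * b)

-- ===== PORT A =====
-- the for-loop over range(160, 8000, 160) with early return
def pvLoopA (avg : Int) : List Int → Int → Int
  | [], points => points
  | i :: rest, points => if avg ≤ i then points else pvLoopA avg rest (points - 2)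

def points_average_pos_related_documents (related_documents_counter : Int) (average_related_doc_position : Int) : Int :=
  if related_documents_counter = 0 then 0
  else
    let avg := pvNormalRoundDiv average_related_doc_position related_documents_counter
    pvLoopA avg (PySem.List.pyRange 160 8000 160) 100

-- ===== PORT B =====
def points_average_pos_related_documents_alt (related_documents_counter : Int) (average_related_doc_position : Int) : Int :=
  if related_documents_counter = 0 then 0
  else
    let avg := pvNormalRoundDiv average_related_doc_position related_documents_counter
    let steps := max 0 (min 49 (PySem.Int.floordiv (avg - 1) 160))
    100 - 2 * steps

-- ===== PRECONDITION & SPEC =====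
def Spec_points_average_pos_related_documents (related_documents_counter : Int) (average_related_doc_position : Int) (out : Int) : Prop := out = points_average_pos_related_documents_alt related_documents_counter average_related_doc_position
instance (related_documents_counter : Int) (average_related_doc_position : Int) (out : Int) : Decidable (Spec_points_average_pos_related_documents related_documents_counter average_related_doc_position out) := by unfold Spec_points_average_pos_related_documents; infer_instance

-- ===== CLAIM (what is proved, stated in full; the proofs are below) =====
def Claim_equal_points_average_pos_related_documents : Prop := ∀ (related_documents_counter : Int) (average_related_doc_position : Int), Dom_points_average_pos_related_documents related_documents_counter average_related_doc_position → Spec_points_average_pos_related_documents related_documents_counter average_related_doc_position (points_average_pos_related_documents related_documents_counter average_related_doc_position)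

-- ===== LEMMAS AND PROOFS =====

-- the ladder over n rungs 160*(off+1), 160*(off+2), … equals the clamped floor division
theorem pvLadder_general (avg : Int) :
    ∀ (n off : Nat) (p : Int),
      pvLoopA avg ((List.range' off n).map (fun k : Nat => ((160 * (k + 1) : Nat) : Int))) p
        = p - 2 * max 0 (min (n : Int) ((avg - 1) / 160 - (off : Int))) := by
  intro n
  induction n with
  | zero => intro off p; simp [pvLoopA, List.range']
  | succ n ih =>
      intro off p
      rw [List.range'_succ, List.map_cons]
      show (if avg ≤ ((160 * (off + 1) : Nat) : Int) then p
            else pvLoopA avg ((List.range' (off+1) n).map fun k : Nat => ((160 * (k + 1) : Nat) : Int)) (p - 2)) = _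
      split_ifs with h
      · push_cast at *; omega
      · rw [ih (off + 1) (p - 2)]; push_cast at *; omega

-- A's concrete 49-rung ladder in closed form
theorem pvLadder_closed (avg : Int) :
    pvLoopA avg (PySem.List.pyRange 160 8000 160) 100
      = 100 - 2 * max 0 (min 49 (PySem.Int.floordiv (avg - 1) 160)) := by
  rw [PySem.Int.floordiv_eq_ediv_of_pos (by omega)]
  have h : PySem.List.pyRange 160 8000 160 =
      (List.range' 0 49).map (fun k : Nat => ((160 * (k + 1) : Nat) : Int)) := by
    rw [PySem.List.pyRange_of_pos _ _ (by norm_num), List.range_eq_range']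
    norm_num
    refine List.map_congr_left ?_
    intro k _; push_cast; ring
  rw [h, pvLadder_general]
  norm_num

-- ===== VERDICT (by name: the statement is the Claim_ definition above) =====
theorem points_average_pos_related_documents_spec : Claim_equal_points_average_pos_related_documents := by
  intro c x _
  unfold Spec_points_average_pos_related_documents
  unfold points_average_pos_related_documents points_average_pos_related_documents_alt
  split_ifs with h
  · rfl
  · exact pvLadder_closed _
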